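-- pv_equiv track=rewrite | github.com/pypi-data/pypi-mirror-385 | packages/yawp/yawp-2.2.0.tar.gz/yawp-2.2.0/yawp/__init__.py | line2stmt
-- ===== SOURCE A (Python) =====
-- def line2stmt(line):
--     """return stripped statement, removing '#'-comments,
-- but preserving '#' quoted by "'" or '"' or '\…' """
--     auto = 0; value = ''
--     for char in line:
--         if auto == 0:
--             if char == '#': break
--             elif char == '\\': value += char; auto = 10
--             elif char == "'": value += char; auto = 1
--             elif char == '"': value += char; auto = 2
--             else: value += char
--         elif auto == 1:
--             if char == '\\': value += char; auto = 11
--             elif char == "'": value += char; auto = 0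
--             else: value += char
--         elif auto == 2:
--             if char == '\\': value += char; auto = 12
--             elif char == '"': value += char; auto = 0
--             else: value += char
--         elif auto == 10:
--             value += char; auto = 0
--         elif auto == 11:
--             value += char; auto = 1
--         elif auto == 12:
--             value += char; auto = 2
--     return value.strip()
-- ===== SOURCE B (Python) =====
-- def line2stmt(line):
--     """return stripped statement, removing '#'-comments,
-- but preserving '#' quoted by "'" or '"' or '\\...' """
--     out = []
--     quote = None
--     i = 0
--     n = len(line)
--     while i < n:
--         c = line[i]
--         if c == '\\':
--             out.append(c)
--             if i + 1 < n:
--                 out.append(line[i + 1])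
--             i += 2
--         elif quote is None and c == '#':
--             break
--         elif quote is None and c in "'\"":
--             quote = c
--             out.append(c)
--             i += 1
--         elif c == quote:
--             quote = None
--             out.append(c)
--             i += 1
--         else:
--             out.append(c)
--             i += 1
--     return ''.join(out).strip()
-- ===== Notes on version B (the rewrite author's own statement) =====
-- stated objective: simpler
-- what changed: Replaces A's 6-valued state-machine for-loop (states 0/1/2 plus escape states 10/11/12) by an index-driven while loop that keeps only the current quote delimiter (None/'/") and consumes escaped pairs in one two-character step.
import Mathlib
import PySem

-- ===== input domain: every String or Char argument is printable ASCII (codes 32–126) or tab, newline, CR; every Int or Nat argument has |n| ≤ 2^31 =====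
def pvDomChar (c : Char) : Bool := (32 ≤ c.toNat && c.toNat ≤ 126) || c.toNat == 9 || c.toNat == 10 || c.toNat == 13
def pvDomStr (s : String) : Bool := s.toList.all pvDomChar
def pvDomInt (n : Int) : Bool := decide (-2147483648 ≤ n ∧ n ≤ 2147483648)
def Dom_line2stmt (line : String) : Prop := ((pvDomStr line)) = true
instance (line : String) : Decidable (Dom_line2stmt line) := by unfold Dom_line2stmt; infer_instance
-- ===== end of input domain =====

-- B replaces A's 6-state automaton by a quote-delimiter variable with an explicit
-- two-character skip for escaped pairs (objective: simpler decomposition, same cost).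


-- ===== PORT A =====
-- A's for-loop over the characters: state `auto` ∈ {0,1,2,10,11,12}, accumulator `value`.
def aLoop (auto : Int) (value : List Char) (cs : List Char) : List Char :=
  match cs with
  | [] => value
  | c :: rest =>
    if auto == 0 then
      if c == '#' then value
      else if c == '\\' then aLoop 10 (value ++ [c]) rest
      else if c == '\'' then aLoop 1 (value ++ [c]) rest
      else if c == '"' then aLoop 2 (value ++ [c]) rest
      else aLoop 0 (value ++ [c]) rest
    else if auto == 1 then
      if c == '\\' then aLoop 11 (value ++ [c]) rest
      else if c == '\'' then aLoop 0 (value ++ [c]) rest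
      else aLoop 1 (value ++ [c]) rest
    else if auto == 2 then
      if c == '\\' then aLoop 12 (value ++ [c]) rest
      else if c == '"' then aLoop 0 (value ++ [c]) rest
      else aLoop 2 (value ++ [c]) rest
    else if auto == 10 then aLoop 0 (value ++ [c]) rest
    else if auto == 11 then aLoop 1 (value ++ [c]) rest
    else if auto == 12 then aLoop 2 (value ++ [c]) rest
    else value  -- unreachable

def line2stmt (line : String) : String :=
  PySem.Str.strip (String.mk (aLoop 0 [] line.toList))

-- ===== PORT B =====
-- B's while-loop: the index advance by 1 or 2 becomes consuming one or two list heads.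
def altLoop (quote : Option Char) (out : List Char) (cs : List Char) : List Char :=
  match cs with
  | [] => out
  | c :: rest =>
    if c == '\\' then
      match rest with
      | [] => out ++ [c]                       -- i+1 < n fails: append only the backslash
      | d :: rest' => altLoop quote (out ++ [c, d]) rest'
    else if quote == none && c == '#' then out
    else if quote == none && (c == '\'' || c == '"') then altLoop (some c) (out ++ [c]) rest
    else if some c == quote then altLoop none (out ++ [c]) rest
    else altLoop quote (out ++ [c]) rest

def line2stmt_alt (line : String) : String :=
  PySem.Str.strip (String.mk (altLoop none [] line.toList))

-- ===== PRECONDITION & SPEC =====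
def Spec_line2stmt (line : String) (out : String) : Prop := out = line2stmt_alt line
instance (line : String) (out : String) : Decidable (Spec_line2stmt line out) := by unfold Spec_line2stmt; infer_instance

-- ===== CLAIM (what is proved, stated in full; the proofs are below) =====
def Claim_equal_line2stmt : Prop := ∀ (line : String), Dom_line2stmt line → Spec_line2stmt line (line2stmt line)

-- ===== LEMMAS AND PROOFS =====

lemma altLoop_cons (quote : Option Char) (out : List Char) (c : Char) (rest : List Char)
    (hb : (c == '\\') = false) :
    altLoop quote out (c :: rest) =
      if quote == none && c == '#' then out
      else if quote == none && (c == '\'' || c == '"') then altLoop (some c) (out ++ [c]) rest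
      else if some c == quote then altLoop none (out ++ [c]) rest
      else altLoop quote (out ++ [c]) rest := by
  conv_lhs => rw [altLoop.eq_def]
  simp [hb]

-- state correspondence: auto 0 ↔ quote none, 1 ↔ some ''', 2 ↔ some '"';
-- strong induction on the length since B consumes two characters on a backslash.
lemma aLoop_eq_altLoop : ∀ (n : Nat) (cs : List Char), cs.length ≤ n → ∀ value,
    aLoop 0 value cs = altLoop none value cs ∧
    aLoop 1 value cs = altLoop (some '\'') value cs ∧
    aLoop 2 value cs = altLoop (some '"') value cs := by
  intro n
  induction n with
  | zero =>
    intro cs h value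
    have : cs = [] := List.eq_nil_of_length_eq_zero (Nat.le_zero.mp h)
    subst this
    simp [aLoop, altLoop]
  | succ n ih =>
    intro cs h value
    match cs with
    | [] => simp [aLoop, altLoop]
    | c :: rest =>
      by_cases hb : c = '\\'
      · subst hb
        match rest with
        | [] =>
          simp [aLoop, altLoop]
        | d :: rest' =>
          have hlen : rest'.length ≤ n := by
            simp at h; omega
          have h1 : (d :: rest').length ≤ n := by
            simp at h ⊢; omega
          refine ⟨?_, ?_, ?_⟩ <;>
            simp [aLoop, altLoop, (ih _ hlen _).1, (ih _ hlen _).2.1, (ih _ hlen _).2.2,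
              List.append_assoc]
      · have hlen : rest.length ≤ n := by simp at h; omega
        have hb' : (c == '\\') = false := by simp [hb]
        refine ⟨?_, ?_, ?_⟩ <;>
          rw [altLoop_cons _ _ _ _ hb'] <;>
          by_cases h1 : c = '#' <;> by_cases h2 : c = '\'' <;> by_cases h3 : c = '"' <;>
            simp_all [aLoop, (ih _ hlen _).1, (ih _ hlen _).2.1, (ih _ hlen _).2.2]

-- ===== VERDICT (by name: the statement is the Claim_ definition above) =====
theorem line2stmt_spec : Claim_equal_line2stmt := by
  intro line _
  unfold Spec_line2stmt line2stmt line2stmt_alt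
  rw [(aLoop_eq_altLoop line.toList.length line.toList le_rfl []).1]
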